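-- pv_equiv track=rewrite | github.com/ARobicsek/psalms-AI-analysis | src/agents/phonetic_analyst.py | _find_syllable_for_phoneme
-- ===== SOURCE A (Python) =====
-- def _find_syllable_for_phoneme(syllables: list, phoneme_index: int) -> int:
--     """
--     Find which syllable contains the phoneme at the given index.
--
--     Args:
--         syllables: List of syllables (each syllable is a list of phonemes)
--         phoneme_index: Index into the flattened phoneme list
--
--     Returns:
--         Syllable index (0-based), or None if not found
--     """
--     current_pos = 0
--     for syl_idx, syllable in enumerate(syllables):
--         syllable_length = len(syllable)
--         if current_pos <= phoneme_index < current_pos + syllable_length: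
--             return syl_idx
--         current_pos += syllable_length
--     return None
-- ===== SOURCE B (Python) =====
-- def _find_syllable_for_phoneme(syllables: list, phoneme_index: int) -> int:
--     # Build a flattened lookup table: table[i] = index of the syllable owning
--     # flattened phoneme i; then answer with a single bounds-checked lookup.
--     table = [syl_idx for syl_idx, syllable in enumerate(syllables) for _ in syllable]
--     if 0 <= phoneme_index < len(table):
--         return table[phoneme_index]
--     return None
-- ===== Notes on version B (the rewrite author's own statement) =====
-- stated objective: alternative
-- what changed: Replaces the running-position scan with building a flattened owner-index table once and answering by a single bounds-checked direct lookup.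
import Mathlib
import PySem

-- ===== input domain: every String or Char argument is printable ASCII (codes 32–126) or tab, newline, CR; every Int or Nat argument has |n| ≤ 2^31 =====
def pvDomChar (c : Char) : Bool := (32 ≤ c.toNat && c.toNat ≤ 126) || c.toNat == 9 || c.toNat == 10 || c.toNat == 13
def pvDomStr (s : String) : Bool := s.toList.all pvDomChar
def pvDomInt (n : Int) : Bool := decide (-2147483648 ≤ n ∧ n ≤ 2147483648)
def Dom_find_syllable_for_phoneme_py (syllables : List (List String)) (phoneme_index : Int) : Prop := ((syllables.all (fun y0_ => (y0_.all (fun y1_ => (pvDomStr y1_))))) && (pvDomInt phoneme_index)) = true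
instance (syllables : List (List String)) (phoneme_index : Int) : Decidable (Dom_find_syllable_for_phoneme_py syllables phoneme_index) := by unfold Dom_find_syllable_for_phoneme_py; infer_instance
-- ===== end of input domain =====

-- ===== PORT A =====
-- A's loop: running position + enumerate index, returning on the first containing syllable.
def pvALoop (syls : List (List String)) (sylIdx : Int) (currentPos : Int) (phonemeIndex : Int) : Option Int :=
  match syls with
  | [] => none
  | syllable :: rest =>
    let syllableLength : Int := syllable.length
    if currentPos ≤ phonemeIndex ∧ phonemeIndex < currentPos + syllableLength then some sylIdx
    else pvALoop rest (sylIdx + 1) (currentPos + syllableLength) phonemeIndex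

def find_syllable_for_phoneme_py (syllables : List (List String)) (phoneme_index : Int) : Option Int :=
  pvALoop syllables 0 0 phoneme_index

-- ===== PORT B =====
-- B: flattened owner-index table (comprehension over enumerate), then a bounds-checked lookup.
def pvTable (syllables : List (List String)) : List Int :=
  (PySem.List.enumerate syllables).flatMap (fun p => p.2.map (fun _ => p.1))

def find_syllable_for_phoneme_py_alt (syllables : List (List String)) (phoneme_index : Int) : Option Int :=
  let table := pvTable syllables
  if 0 ≤ phoneme_index ∧ phoneme_index < table.length then table[phoneme_index.toNat]? else none

-- ===== PRECONDITION & SPEC =====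
def Spec_find_syllable_for_phoneme_py (syllables : List (List String)) (phoneme_index : Int) (out : Option Int) : Prop := out = find_syllable_for_phoneme_py_alt syllables phoneme_index
instance (syllables : List (List String)) (phoneme_index : Int) (out : Option Int) : Decidable (Spec_find_syllable_for_phoneme_py syllables phoneme_index out) := by unfold Spec_find_syllable_for_phoneme_py; infer_instance

-- ===== CLAIM (what is proved, stated in full; the proofs are below) =====
def Claim_equal_find_syllable_for_phoneme_py : Prop := ∀ (syllables : List (List String)) (phoneme_index : Int), Dom_find_syllable_for_phoneme_py syllables phoneme_index → Spec_find_syllable_for_phoneme_py syllables phoneme_index (find_syllable_for_phoneme_py syllables phoneme_index)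

-- ===== LEMMAS AND PROOFS =====

-- table built from `enumerate syls s`, recursively
def pvTbl (syls : List (List String)) (s : Int) : List Int :=
  (PySem.List.enumerate syls s).flatMap (fun p => p.2.map (fun _ => p.1))

theorem pvTbl_cons (x : List String) (xs : List (List String)) (s : Int) :
    pvTbl (x :: xs) s = x.map (fun _ => s) ++ pvTbl xs (s + 1) := by
  simp [pvTbl, PySem.List.enumerate_cons]

theorem pvLoop_eq (syls : List (List String)) (s pos pi : Int) :
    pvALoop syls s pos pi =
      (if 0 ≤ pi - pos ∧ pi - pos < (pvTbl syls s).length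
       then (pvTbl syls s)[(pi - pos).toNat]? else none) := by
  induction syls generalizing s pos with
  | nil => simp [pvALoop, pvTbl, PySem.List.enumerate_nil]
  | cons x xs ih =>
    rw [pvTbl_cons]
    simp only [pvALoop]
    by_cases h : pos ≤ pi ∧ pi < pos + (x.length : Int)
    · have hlt : (pi - pos).toNat < (x.map (fun _ => s)).length := by
        simp only [List.length_map]; omega
      rw [if_pos h,
          if_pos (by simp only [List.length_append, List.length_map, Nat.cast_add]; omega),
          List.getElem?_append_left hlt, List.getElem?_eq_getElem hlt]
      simp
    · rw [if_neg h, ih (s + 1) (pos + x.length)]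
      by_cases h2 : 0 ≤ pi - (pos + (x.length : Int)) ∧
          pi - (pos + (x.length : Int)) < ((pvTbl xs (s + 1)).length : Int)
      · rw [if_pos h2,
            if_pos (by simp only [List.length_append, List.length_map, Nat.cast_add]; omega),
            List.getElem?_append_right (by simp only [List.length_map]; omega)]
        congr 1
        simp only [List.length_map]
        omega
      · rw [if_neg h2,
            if_neg (by simp only [List.length_append, List.length_map, Nat.cast_add]; omega)]

-- ===== VERDICT (by name: the statement is the Claim_ definition above) =====
theorem find_syllable_for_phoneme_py_spec : Claim_equal_find_syllable_for_phoneme_py := by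
  intro syls pi _
  unfold Spec_find_syllable_for_phoneme_py find_syllable_for_phoneme_py find_syllable_for_phoneme_py_alt
  rw [pvLoop_eq]
  simp only [pvTbl, pvTable, sub_zero]
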